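-- pv_equiv track=rewrite | github.com/ticotheps/Sprint-Challenge--Algorithms | notes.py | exercise_b
-- ===== SOURCE A (Python) =====
-- def exercise_b(n):
--     sum = 0
--     for i in range(n):
--         i += 1
--         for j in range(i + 1, n):
--             j += 1
--             for k in range(j + 1, n):
--                 k += 1
--                 for l in range(k + 1, 10 + k):
--                     l += 1
--                     sum += 1
--     return sum
-- ===== SOURCE B (Python) =====
-- def exercise_b(n):
--     # Closed form: the triple loop counts 9 per triple i<j<k with gaps >= 2,
--     # i.e. 9 * C(n-2, 3).
--     m = n - 2
--     if m < 3:
--         return 0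
--     return 9 * m * (m - 1) * (m - 2) // 6
-- ===== Notes on version B (the rewrite author's own statement) =====
-- stated objective: faster
-- what changed: Replaced the quadruple nested loop counting by the closed-form formula 9*(n-2)(n-3)(n-4)/6 = 9*C(n-2,3).
import Mathlib
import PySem

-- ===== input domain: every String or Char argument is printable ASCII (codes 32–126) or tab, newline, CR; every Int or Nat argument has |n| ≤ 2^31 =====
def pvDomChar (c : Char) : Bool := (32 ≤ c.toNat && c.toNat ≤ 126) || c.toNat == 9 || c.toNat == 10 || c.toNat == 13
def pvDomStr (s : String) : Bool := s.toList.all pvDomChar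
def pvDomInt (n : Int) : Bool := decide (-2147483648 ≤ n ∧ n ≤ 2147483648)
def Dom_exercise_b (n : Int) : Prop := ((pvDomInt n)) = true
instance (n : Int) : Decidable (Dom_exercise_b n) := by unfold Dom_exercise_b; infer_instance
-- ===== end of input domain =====

-- B replaces A's quadruple nested counting loop by the closed-form value 9*C(n-2,3) (faster).


-- ===== PORT A =====
-- literal transliteration: the loop variables are incremented inside the body
-- ('i += 1' etc.), which shifts the start of each inner range; 'l += 1' is dead.
def exercise_b (n : Int) : Int :=
  (PySem.List.pyRange 0 n 1).foldl (fun sum i0 =>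
    let i := i0 + 1
    (PySem.List.pyRange (i + 1) n 1).foldl (fun sum j0 =>
      let j := j0 + 1
      (PySem.List.pyRange (j + 1) n 1).foldl (fun sum k0 =>
        let k := k0 + 1
        (PySem.List.pyRange (k + 1) (10 + k) 1).foldl (fun sum l0 =>
          let _l := l0 + 1
          sum + 1) sum) sum) sum) 0

-- ===== PORT B =====
def exercise_b_alt (n : Int) : Int :=
  let m := n - 2
  if m < 3 then 0 else PySem.Int.floordiv (9 * m * (m - 1) * (m - 2)) 6

-- ===== PRECONDITION & SPEC =====
def Spec_exercise_b (n : Int) (out : Int) : Prop := out = exercise_b_alt n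
instance (n : Int) (out : Int) : Decidable (Spec_exercise_b n out) := by unfold Spec_exercise_b; infer_instance

-- ===== CLAIM (what is proved, stated in full; the proofs are below) =====
def Claim_equal_exercise_b : Prop := ∀ (n : Int), Dom_exercise_b n → Spec_exercise_b n (exercise_b n)

-- ===== LEMMAS AND PROOFS =====

-- the value of the j-loop body sum over a range of length m (9 per k, counted by the k-range)
def pvH2 : Nat → Int
  | 0 => 0
  | (m + 1) => 9 * ((m - 1 : Nat) : Int) + pvH2 m

-- the value of the whole i-loop over a range of length m
def pvH3 : Nat → Int
  | 0 => 0
  | (m + 1) => pvH2 (m - 1) + pvH3 m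

-- innermost l-loop: adds 1 per element
lemma pv_count (l : List Int) : ∀ (s : Int),
    l.foldl (fun sum _l0 => sum + 1) s = s + l.length := by
  induction l with
  | nil => intro s; simp
  | cons x t ih => intro s; simp [List.foldl, ih]; omega

lemma pv_L4 (k0 s : Int) :
    (PySem.List.pyRange (k0 + 1 + 1) (10 + (k0 + 1)) 1).foldl (fun sum _l0 => sum + 1) s
      = s + 9 := by
  rw [pv_count]
  simp [PySem.List.length_pyRange_one]
  omega

-- k-loop: adds 9 per element
lemma pv_L3 : ∀ (m : Nat) (a n s : Int), (n - a).toNat = m →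
    (PySem.List.pyRange a n 1).foldl (fun sum k0 =>
        (PySem.List.pyRange (k0 + 1 + 1) (10 + (k0 + 1)) 1).foldl
          (fun sum _l0 => sum + 1) sum) s
      = s + 9 * (m : Int) := by
  intro m
  induction m with
  | zero =>
      intro a n s h
      rw [PySem.List.pyRange_one_eq_nil (by omega)]
      simp
  | succ m ih =>
      intro a n s h
      rw [PySem.List.pyRange_one_cons (by omega)]
      simp only [List.foldl_cons]
      rw [pv_L4 a s]
      rw [ih (a + 1) n (s + 9) (by omega)]
      push_cast; ring

-- j-loop
lemma pv_L2 : ∀ (m : Nat) (a n s : Int), (n - a).toNat = m →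
    (PySem.List.pyRange a n 1).foldl (fun sum j0 =>
        (PySem.List.pyRange (j0 + 1 + 1) n 1).foldl (fun sum k0 =>
          (PySem.List.pyRange (k0 + 1 + 1) (10 + (k0 + 1)) 1).foldl
            (fun sum _l0 => sum + 1) sum) sum) s
      = s + pvH2 m := by
  intro m
  induction m with
  | zero =>
      intro a n s h
      rw [PySem.List.pyRange_one_eq_nil (by omega)]
      simp [pvH2]
  | succ m ih =>
      intro a n s h
      rw [PySem.List.pyRange_one_cons (by omega)]
      simp only [List.foldl_cons]
      rw [pv_L3 ((m - 1 : Nat)) (a + 1 + 1) n s (by omega)]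
      rw [ih (a + 1) n _ (by omega)]
      simp [pvH2]; ring

-- i-loop
lemma pv_L1 : ∀ (m : Nat) (a n s : Int), (n - a).toNat = m →
    (PySem.List.pyRange a n 1).foldl (fun sum i0 =>
        (PySem.List.pyRange (i0 + 1 + 1) n 1).foldl (fun sum j0 =>
          (PySem.List.pyRange (j0 + 1 + 1) n 1).foldl (fun sum k0 =>
            (PySem.List.pyRange (k0 + 1 + 1) (10 + (k0 + 1)) 1).foldl
              (fun sum _l0 => sum + 1) sum) sum) sum) s
      = s + pvH3 m := by
  intro m
  induction m with
  | zero =>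
      intro a n s h
      rw [PySem.List.pyRange_one_eq_nil (by omega)]
      simp [pvH3]
  | succ m ih =>
      intro a n s h
      rw [PySem.List.pyRange_one_cons (by omega)]
      simp only [List.foldl_cons]
      rw [pv_L2 ((m - 1 : Nat)) (a + 1 + 1) n s (by omega)]
      rw [ih (a + 1) n _ (by omega)]
      simp [pvH3]; ring

lemma pv_A_eq (n : Int) : exercise_b n = pvH3 n.toNat := by
  show (PySem.List.pyRange 0 n 1).foldl (fun sum i0 =>
        (PySem.List.pyRange (i0 + 1 + 1) n 1).foldl (fun sum j0 =>
          (PySem.List.pyRange (j0 + 1 + 1) n 1).foldl (fun sum k0 =>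
            (PySem.List.pyRange (k0 + 1 + 1) (10 + (k0 + 1)) 1).foldl
              (fun sum _l0 => sum + 1) sum) sum) sum) 0 = pvH3 n.toNat
  rw [pv_L1 n.toNat 0 n 0 (by omega)]
  ring

lemma pv_H2_closed : ∀ (m : Nat), 2 * pvH2 (m + 1) = 9 * (m : Int) * ((m : Int) - 1) := by
  intro m
  induction m with
  | zero => simp [pvH2]
  | succ m ih =>
      show 2 * (9 * (((m + 1 - 1 : Nat)) : Int) + pvH2 (m + 1)) = _
      rw [mul_add, ih]
      push_cast; ring

lemma pv_H3_closed : ∀ (m : Nat),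
    2 * pvH3 (m + 2) = 3 * (m : Int) * ((m : Int) - 1) * ((m : Int) - 2) := by
  intro m
  induction m with
  | zero => simp [pvH3, pvH2]
  | succ m ih =>
      show 2 * (pvH2 (m + 2 - 1) + pvH3 (m + 2)) = _
      rw [mul_add, ih, (by norm_num : m + 2 - 1 = m + 1), pv_H2_closed m]
      push_cast; ring

-- ===== VERDICT (by name: the statement is the Claim_ definition above) =====
theorem exercise_b_spec : Claim_equal_exercise_b := by
  intro n _
  unfold Spec_exercise_b exercise_b_alt
  rw [pv_A_eq]
  by_cases h : n - 2 < 3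
  · simp only [h, if_pos]
    have ht : n.toNat ≤ 4 := by omega
    interval_cases h' : n.toNat <;> simp [pvH3, pvH2]
  · simp only [h, if_false]
    have h5 : 5 ≤ n := by omega
    have hm : n.toNat = (n.toNat - 2) + 2 := by omega
    have hc := pv_H3_closed (n.toNat - 2)
    rw [← hm] at hc
    have hcast : ((n.toNat - 2 : Nat) : Int) = n - 2 := by omega
    rw [hcast] at hc
    have h6 : 9 * (n - 2) * (n - 2 - 1) * (n - 2 - 2) = 6 * pvH3 n.toNat := by linarith
    rw [h6, PySem.Int.floordiv_eq_ediv_of_pos (by norm_num)]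
    omega
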